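-- pv_equiv track=rewrite | github.com/uujinn/Algorithm-Study | Programmers/3진법_뒤집기-YJ.py | getTernary
-- ===== SOURCE A (Python) =====
-- def getTernary(x): # 앞 뒤 반전된 3진법 구하기
--     answer = ""
--     while x > 0:
--         answer += str(x % 3)
--         x //= 3
--         if 0 < x < 3:
--             answer += str(x)
--             break
--     return answer
-- ===== SOURCE B (Python) =====
-- def getTernary(x):
--     # recursive division recurrence instead of A's while-loop with early break
--     if x <= 0:
--         return ""
--     return str(x % 3) + getTernary(x // 3)
-- ===== Notes on version B (the rewrite author's own statement) =====
-- stated objective: simpler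
-- what changed: Replaced the while-loop with accumulator and its redundant early-break branch by a direct recursion on the division recurrence str(x%3) + getTernary(x//3).
import Mathlib
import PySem

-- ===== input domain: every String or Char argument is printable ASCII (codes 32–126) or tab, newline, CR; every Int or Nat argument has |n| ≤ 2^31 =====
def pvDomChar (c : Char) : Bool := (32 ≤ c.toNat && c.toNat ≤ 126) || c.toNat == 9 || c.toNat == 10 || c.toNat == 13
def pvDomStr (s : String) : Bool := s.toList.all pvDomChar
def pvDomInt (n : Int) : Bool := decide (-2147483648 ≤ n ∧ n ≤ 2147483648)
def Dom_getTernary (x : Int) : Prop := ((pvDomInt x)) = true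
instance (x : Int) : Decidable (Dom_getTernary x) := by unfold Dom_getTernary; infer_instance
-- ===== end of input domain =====

-- B replaces A's while-loop with accumulator and early-break branch by a direct
-- recursion on the division recurrence (objective: simpler).

-- ===== PORT A =====
-- termination: x // 3 strictly decreases (in .toNat) while x > 0
theorem pvLoopDec (x : Int) (h : 0 < x) : (PySem.Int.floordiv x 3).toNat < x.toNat := by
  rw [PySem.Int.floordiv_eq_ediv_of_pos (by omega)]; omega

-- the while-loop of A, with its early-break branch, over the state (x, answer)
def getTernaryLoop (x : Int) (answer : String) : String :=
  if h : 0 < x then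
    let answer' := answer ++ PySem.Int.toStr (PySem.Int.mod x 3)
    let x' := PySem.Int.floordiv x 3
    if 0 < x' ∧ x' < 3 then answer' ++ PySem.Int.toStr x'
    else getTernaryLoop x' answer'
  else answer
termination_by x.toNat
decreasing_by exact pvLoopDec x h

def getTernary (x : Int) : String := getTernaryLoop x ""

-- ===== PORT B =====
def getTernary_alt (x : Int) : String :=
  if h : x ≤ 0 then ""
  else PySem.Int.toStr (PySem.Int.mod x 3) ++ getTernary_alt (PySem.Int.floordiv x 3)
termination_by x.toNat
decreasing_by exact pvLoopDec x (by omega)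

-- ===== PRECONDITION & SPEC =====
def Spec_getTernary (x : Int) (out : String) : Prop := out = getTernary_alt x
instance (x : Int) (out : String) : Decidable (Spec_getTernary x out) := by unfold Spec_getTernary; infer_instance

-- ===== CLAIM (what is proved, stated in full; the proofs are below) =====
def Claim_equal_getTernary : Prop := ∀ (x : Int), Dom_getTernary x → Spec_getTernary x (getTernary x)

-- ===== LEMMAS AND PROOFS =====
theorem alt_nonpos (x : Int) (h : x ≤ 0) : getTernary_alt x = "" := by
  rw [getTernary_alt]; simp [h]

theorem alt_small (x : Int) (h1 : 0 < x) (h2 : x < 3) :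
    getTernary_alt x = PySem.Int.toStr x := by
  have hx : x = 1 ∨ x = 2 := by omega
  rw [getTernary_alt]
  rcases hx with rfl | rfl <;> simp <;> rw [alt_nonpos _ (by norm_num)] <;> rfl

theorem loop_eq_alt : ∀ (n : Nat) (x : Int), x.toNat ≤ n → ∀ (answer : String),
    getTernaryLoop x answer = answer ++ getTernary_alt x := by
  intro n
  induction n with
  | zero =>
    intro x hx answer
    have hx0 : x ≤ 0 := by omega
    rw [getTernaryLoop, alt_nonpos x hx0]
    simp [not_lt.mpr hx0]
  | succ n ih =>
    intro x hx answer
    by_cases h : 0 < x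
    · rw [getTernaryLoop, getTernary_alt]
      simp only [h, dif_pos, not_le.mpr h, dif_neg, not_false_iff]
      set x' := PySem.Int.floordiv x 3 with hx'
      have hlt : x'.toNat < x.toNat := pvLoopDec x h
      by_cases hs : 0 < x' ∧ x' < 3
      · rw [if_pos hs, alt_small x' hs.1 hs.2, String.append_assoc]
      · rw [if_neg hs, ih x' (by omega), String.append_assoc]
    · rw [getTernaryLoop, alt_nonpos x (by omega)]
      simp [h]

-- ===== VERDICT (by name: the statement is the Claim_ definition above) =====
theorem getTernary_spec : Claim_equal_getTernary := by
  intro x _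
  unfold Spec_getTernary getTernary
  rw [loop_eq_alt x.toNat x le_rfl ""]
  simp
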